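-- pv_equiv track=rewrite | github.com/lyn-007/XGB4mcPred | src/feature_ext.py | two_hot
-- ===== SOURCE A (Python) =====
-- def two_hot(sequence):
--     nucleotides = {
--     'AA' : [0,0,0,0,0,0,0,0,0,0,0,0,0,0,0,1],
--     'AC' : [0,0,0,0,0,0,0,0,0,0,0,0,0,0,1,0],
--     'AG' : [0,0,0,0,0,0,0,0,0,0,0,0,0,1,0,0],
--     'AT' : [0,0,0,0,0,0,0,0,0,0,0,0,1,0,0,0],
--     'CA' : [0,0,0,0,0,0,0,0,0,0,0,1,0,0,0,0],
--     'CC' : [0,0,0,0,0,0,0,0,0,0,1,0,0,0,0,0],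
--     'CG' : [0,0,0,0,0,0,0,0,0,1,0,0,0,0,0,0],
--     'CT' : [0,0,0,0,0,0,0,0,1,0,0,0,0,0,0,0],
--     'GA' : [0,0,0,0,0,0,0,1,0,0,0,0,0,0,0,0],
--     'GC' : [0,0,0,0,0,0,1,0,0,0,0,0,0,0,0,0],
--     'GG' : [0,0,0,0,0,1,0,0,0,0,0,0,0,0,0,0],
--     'GT' : [0,0,0,0,1,0,0,0,0,0,0,0,0,0,0,0],
--     'TA' : [0,0,0,1,0,0,0,0,0,0,0,0,0,0,0,0],
--     'TC' : [0,0,1,0,0,0,0,0,0,0,0,0,0,0,0,0],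
--     'TG' : [0,1,0,0,0,0,0,0,0,0,0,0,0,0,0,0],
--     'TT' : [1,0,0,0,0,0,0,0,0,0,0,0,0,0,0,0]
--     }
--
--     vector = []
--     for i in range(len(sequence)-1):
--         vector += nucleotides[sequence[i:i+2]]
--     return vector
-- ===== SOURCE B (Python) =====
-- def two_hot(sequence):
--     base = {'A': 0, 'C': 1, 'G': 2, 'T': 3}
--     ranks = [4 * base[a] + base[b] for a, b in zip(sequence, sequence[1:])]
--     return [1 if j % 16 == 15 - ranks[j // 16] else 0 for j in range(16 * len(ranks))]
-- ===== Notes on version B (the rewrite author's own statement) =====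
-- stated objective: alternative
-- what changed: B runs two staged passes instead of A's single table-driven block-appending loop: it first pairs adjacent characters with zip and maps them to integer ranks, then generates the whole flat output in one comprehension over output positions j, computing each bit by the closed-form test j % 16 == 15 - ranks[j // 16] (no 16-vector table, no per-pair list concatenation).
import Mathlib
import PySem

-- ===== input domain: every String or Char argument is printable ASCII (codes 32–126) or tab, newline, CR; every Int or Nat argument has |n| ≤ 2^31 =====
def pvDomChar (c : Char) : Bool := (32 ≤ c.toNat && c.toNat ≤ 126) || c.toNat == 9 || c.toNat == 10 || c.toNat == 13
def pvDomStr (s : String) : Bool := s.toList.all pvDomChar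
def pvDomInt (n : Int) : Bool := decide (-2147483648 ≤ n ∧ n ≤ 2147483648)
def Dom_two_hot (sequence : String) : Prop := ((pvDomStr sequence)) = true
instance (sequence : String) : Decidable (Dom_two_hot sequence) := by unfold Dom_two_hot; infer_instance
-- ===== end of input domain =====

-- B is an alternative of the same cost: zip adjacent characters into a rank list, then emit the
-- flat output by a per-position formula (j % 16 == 15 - ranks[j // 16]) instead of appending
-- table-fetched 16-vectors pair by pair.

-- ===== PORT A =====
-- A's 16-entry dict literal, built by insertion as in the Python source.
def twoHotTable : PySem.Dict String (List Int) :=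
  (((((((((((((((((PySem.Dict.empty).insert "AA" [0,0,0,0,0,0,0,0,0,0,0,0,0,0,0,1]).insert
    "AC" [0,0,0,0,0,0,0,0,0,0,0,0,0,0,1,0]).insert
    "AG" [0,0,0,0,0,0,0,0,0,0,0,0,0,1,0,0]).insert
    "AT" [0,0,0,0,0,0,0,0,0,0,0,0,1,0,0,0]).insert
    "CA" [0,0,0,0,0,0,0,0,0,0,0,1,0,0,0,0]).insert
    "CC" [0,0,0,0,0,0,0,0,0,0,1,0,0,0,0,0]).insert
    "CG" [0,0,0,0,0,0,0,0,0,1,0,0,0,0,0,0]).insert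
    "CT" [0,0,0,0,0,0,0,0,1,0,0,0,0,0,0,0]).insert
    "GA" [0,0,0,0,0,0,0,1,0,0,0,0,0,0,0,0]).insert
    "GC" [0,0,0,0,0,0,1,0,0,0,0,0,0,0,0,0]).insert
    "GG" [0,0,0,0,0,1,0,0,0,0,0,0,0,0,0,0]).insert
    "GT" [0,0,0,0,1,0,0,0,0,0,0,0,0,0,0,0]).insert
    "TA" [0,0,0,1,0,0,0,0,0,0,0,0,0,0,0,0]).insert
    "TC" [0,0,1,0,0,0,0,0,0,0,0,0,0,0,0,0]).insert
    "TG" [0,1,0,0,0,0,0,0,0,0,0,0,0,0,0,0]).insert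
    "TT" [1,0,0,0,0,0,0,0,0,0,0,0,0,0,0,0])

-- nucleotides[sequence[i:i+2]]: KeyError (= none) is excluded by Pre_two_hot, so getD's default is never used.
def two_hot (sequence : String) : List Int :=
  (PySem.List.pyRange 0 (sequence.toList.length - 1) 1).foldl
    (fun vector i =>
      vector ++ (twoHotTable.get? (String.ofList
        (PySem.List.slice sequence.toList (some i) (some (i + 2))))).getD [])
    []

-- ===== PORT B =====
-- base[c]: KeyError (= none) is excluded by Pre_two_hot, so getD's default is never used.
def twoHotBase : PySem.Dict Char Int :=
  ((((PySem.Dict.empty).insert 'A' 0).insert 'C' 1).insert 'G' 2).insert 'T' 3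

-- Source B: ranks = [4*base[a]+base[b] for a,b in zip(sequence, sequence[1:])];
--       [1 if j % 16 == 15 - ranks[j//16] else 0 for j in range(16*len(ranks))]
def two_hot_alt (sequence : String) : List Int :=
  let cs := sequence.toList
  let ranks := (cs.zip (PySem.List.slice cs (some 1) none)).map
    (fun p => 4 * (twoHotBase.get? p.1).getD 0 + (twoHotBase.get? p.2).getD 0)
  (PySem.List.pyRange 0 (16 * (ranks.length : Int)) 1).map
    (fun j => if PySem.Int.mod j 16 == 15 - PySem.List.pyGetD ranks (PySem.Int.floordiv j 16) 0
              then (1 : Int) else 0)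

-- ===== PRECONDITION & SPEC =====
-- Pre_ excludes exactly the inputs on which Python A raises KeyError: a string of length ≥ 2
-- containing a character other than the four nucleotide letters.
def Pre_two_hot (sequence : String) : Prop :=
  sequence.toList.length ≤ 1 ∨
    (sequence.toList.all fun c => c == 'A' || c == 'C' || c == 'G' || c == 'T') = true
instance (sequence : String) : Decidable (Pre_two_hot sequence) := by
  unfold Pre_two_hot; infer_instance
def pvWitness_two_hot : String := "ACGTTA"

def Spec_two_hot (sequence : String) (out : List Int) : Prop := out = two_hot_alt sequence
instance (sequence : String) (out : List Int) : Decidable (Spec_two_hot sequence out) := by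
  unfold Spec_two_hot; infer_instance

-- ===== CLAIM (what is proved, stated in full; the proofs are below) =====
def Claim_equal_two_hot : Prop :=
  ∀ (sequence : String), Dom_two_hot sequence → Pre_two_hot sequence →
    Spec_two_hot sequence (two_hot sequence)

-- ===== LEMMAS AND PROOFS =====

-- Chunk decomposition: a flatMap of 16-element blocks is a flat map over 16*k positions.
lemma chunk_eq (blk : Nat → List Int) (h : Nat → Int) :
    ∀ k : Nat, (∀ i < k, blk i = (List.range 16).map (fun r => h (16 * i + r))) →
      (List.range k).flatMap blk = (List.range (16 * k)).map h := by
  intro k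
  induction k with
  | zero => intro _; rfl
  | succ k ih =>
    intro hall
    have h16 : 16 * (k + 1) = 16 * k + 16 := by ring
    rw [List.range_succ, List.flatMap_append, ih (fun i hi => hall i (by omega)),
        h16, List.range_add, List.map_append, List.map_map]
    simp [hall k (by omega), Function.comp]

-- Per-pair agreement: for ACGT characters the table's vector equals the arithmetic one-hot block.
lemma block_eq (c0 c1 : Char)
    (h0 : c0 ∈ (['A', 'C', 'G', 'T'] : List Char))
    (h1 : c1 ∈ (['A', 'C', 'G', 'T'] : List Char)) :
    (twoHotTable.get? (String.ofList [c0, c1])).getD [] =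
      (List.range 16).map (fun (r : Nat) =>
        if (((r : Int)) == 15 - (4 * (twoHotBase.get? c0).getD 0 + (twoHotBase.get? c1).getD 0))
        then (1 : Int) else 0) := by
  fin_cases h0 <;> fin_cases h1 <;> decide

theorem two_hot_spec : Claim_equal_two_hot := by
  intro s _ hpre
  unfold Spec_two_hot two_hot two_hot_alt
  simp only [PySem.List.slice_from_one]
  set cs := s.toList with hcs
  unfold Pre_two_hot at hpre
  rw [← hcs] at hpre
  set ranks := (cs.zip cs.tail).map
    (fun p => 4 * (twoHotBase.get? p.1).getD 0 + (twoHotBase.get? p.2).getD 0) with hranks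
  have hklen : ranks.length = cs.length - 1 := by
    simp [hranks, List.length_zip, List.length_tail]
  by_cases hsmall : cs.length ≤ 1
  · -- both ranges are empty
    have h1 : (cs.length : Int) - 1 ≤ 0 := by omega
    have h2 : 16 * (ranks.length : Int) ≤ 0 := by
      have : ranks.length = 0 := by omega
      simp [this]
    rw [PySem.List.pyRange_one_eq_nil (by omega), PySem.List.pyRange_one_eq_nil (by omega)]
    rfl
  · have hn : 2 ≤ cs.length := by omega
    have hall : ∀ c ∈ cs, c ∈ (['A', 'C', 'G', 'T'] : List Char) := by
      rcases hpre with h | h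
      · omega
      · intro c hc
        have := List.all_eq_true.mp h c hc
        simp only [Bool.or_eq_true, beq_iff_eq] at this
        simp only [List.mem_cons, List.not_mem_nil, or_false]
        tauto
    -- A as a flatMap over pair indices, B as a map over flat positions, both via List.range
    rw [PySem.List.foldl_append_eq_flatMap, List.nil_append,
        PySem.List.pyRange_one, List.flatMap_map,
        PySem.List.pyRange_one, List.map_map]
    have ht1 : ((cs.length : Int) - 1 - 0).toNat = cs.length - 1 := by omega
    have ht2 : (16 * (ranks.length : Int) - 0).toNat = 16 * ranks.length := by omega
    rw [ht1, ht2, ← hklen]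
    apply chunk_eq
    intro i hi
    have hi1 : i + 1 < cs.length := by omega
    simp only [Function.comp, zero_add]
    -- identify the pair (c0, c1) at index i
    have hzlen : i < (cs.zip cs.tail).length := by
      simp only [List.length_zip, List.length_tail]; omega
    have hz : (cs.zip cs.tail)[i]'hzlen = (cs[i], cs[i + 1]) := by
      rw [List.getElem_zip]
      exact congrArg _ (List.getElem_tail ..)
    have hgz : ranks[i] = 4 * (twoHotBase.get? cs[i]).getD 0
        + (twoHotBase.get? cs[i + 1]).getD 0 := by
      simp only [hranks, List.getElem_map, hz]
    -- A's block at i: the slice cs[i:i+2] is [cs[i], cs[i+1]]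
    have hdrop : List.drop i cs = cs[i] :: cs[i + 1] :: List.drop (i + 2) cs := by
      rw [List.drop_eq_getElem_cons (by omega), List.drop_eq_getElem_cons (h := hi1)]
    have hslice : PySem.List.slice cs (some (i : Int)) (some ((i : Int) + 2)) =
        [cs[i], cs[i + 1]] := by
      have h2 : ((i : Int) + 2) = ((i : Int) + ((2 : Nat) : Int)) := by norm_num
      rw [h2, PySem.List.slice_natCast_add, hdrop]
      rfl
    rw [hslice, block_eq cs[i] cs[i + 1] (hall _ (by simp)) (hall _ (by simp))]
    -- B's block formula: evaluate j = 16*i + r through mod/floordiv/pyGetD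
    apply List.map_congr_left
    intro r hr
    have hr16 : r < 16 := List.mem_range.mp hr
    have hj : (((16 * i + r : Nat) : Int)) = 16 * (i : Int) + (r : Int) := by
      push_cast; ring
    rw [hj]
    have hmod : PySem.Int.mod (16 * (i : Int) + (r : Int)) 16 = (r : Int) := by
      rw [PySem.Int.mod_eq_emod_of_pos (by omega)]; omega
    have hdiv : PySem.Int.floordiv (16 * (i : Int) + (r : Int)) 16 = (i : Int) := by
      rw [PySem.Int.floordiv_eq_ediv_of_pos (by omega)]; omega
    rw [hmod, hdiv, PySem.List.pyGetD_natCast, List.getD_eq_getElem ranks 0 (by omega), hgz]
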